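-- pv_equiv track=rewrite | github.com/David-5-5/tutorial | python/algo/202412/leetcode3225.py | maximumScore
-- ===== SOURCE A (Python) =====
-- from math import inf
-- from typing import List
--
-- fmax = lambda x, y: x if x > y else y
--
-- def maximumScore(grid: List[List[int]]) -> int:
--     # 参考题解，还是不太明白
--     n = len(grid)
--     # 按列计算前缀和，initial = 0
--     accs = [[0] * (n+1) for _ in range(n+1)]
--     for r in range(n):
--         for c in range(n):
--             accs[c+1][r+1] = accs[c+1][r] + grid[r][c]
--
--     dp1 = [0] * (n + 1)     # 前一列的行递减状态值
--     dp2 = [-inf] * (n + 1)  # 前一列的行递增状态值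
--
--     for c in range(1, n + 1):
--         ndp1 = [0] * (n + 1)
--         ndp2 = [-inf] * (n + 1)
--
--         for r in range(n + 1):
--             for k in range(r, n + 1):
--                 ndp1[k] = fmax(ndp1[k], dp1[r] + accs[c-1][k] - accs[c-1][r])
--             for k in range(r + 1):
--                 ndp2[k] = fmax(ndp2[k], dp2[r] + accs[c][r] - accs[c][k])
--         # 一种情况：空了两列——此时这一行从 0 起步，ndp1[0]
--         # 另一种情况：空了一列——此时这一行是 n 行起手，ndp[n] (前面做了交换 n,m 操作)
--         ndp1[0] = fmax(ndp1[0], dp2[0])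
--         ndp1[n] = fmax(ndp1[n], dp2[0])
--         # 这里是转移回递减的情况：从满了的增长变为减少
--         ndp2[n] = fmax(ndp2[n], ndp1[n])
--         dp1, dp2 = ndp1, ndp2
--     return max(max(dp1), max(dp2))
-- ===== SOURCE B (Python) =====
-- from math import inf
--
-- def maximumScore(grid):
--     n = len(grid)
--     # column prefix sums: cols[c][r] = sum of grid[0..r-1][c]
--     cols = []
--     for c in range(n):
--         col = [0]
--         s = 0
--         for row in grid:
--             s += row[c]
--             col.append(s)
--         cols.append(col)
--
--     dp1 = [0] * (n + 1)
--     dp2 = [-inf] * (n + 1)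
--     prev = [0] * (n + 1)          # prefix sums of the column before the current one
--     for a2 in cols:
--         a1 = prev
--         # ndp1[k] = max(0, a1[k] + max_{r<=k}(dp1[r] - a1[r])) via a running prefix max
--         ndp1 = []
--         best = -inf
--         for k in range(n + 1):
--             best = max(best, dp1[k] - a1[k])
--             ndp1.append(max(0, a1[k] + best))
--         # ndp2[k] = max_{r>=k}(dp2[r] + a2[r]) - a2[k] via a running suffix max
--         ndp2 = []
--         best = -inf
--         for i in range(n + 1):
--             k = n - i
--             best = max(best, dp2[k] + a2[k])
--             ndp2.append(best - a2[k])
--         ndp2.reverse()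
--         ndp1[0] = max(ndp1[0], dp2[0])
--         ndp1[n] = max(ndp1[n], dp2[0])
--         ndp2[n] = max(ndp2[n], ndp1[n])
--         dp1, dp2 = ndp1, ndp2
--         prev = a2
--     return max(max(dp1), max(dp2))
-- ===== Notes on version B (the rewrite author's own statement) =====
-- stated objective: faster
-- what changed: B replaces A's O(n^2)-per-column pair of nested r/k loops by a single prefix running max of dp1[r]-acc[r] and a single suffix running max of dp2[r]+acc[r] per column (and builds the column prefix sums by a per-column scan instead of A's 2D table), turning the O(n^3) DP transition into O(n^2) overall.
import Mathlib
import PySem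

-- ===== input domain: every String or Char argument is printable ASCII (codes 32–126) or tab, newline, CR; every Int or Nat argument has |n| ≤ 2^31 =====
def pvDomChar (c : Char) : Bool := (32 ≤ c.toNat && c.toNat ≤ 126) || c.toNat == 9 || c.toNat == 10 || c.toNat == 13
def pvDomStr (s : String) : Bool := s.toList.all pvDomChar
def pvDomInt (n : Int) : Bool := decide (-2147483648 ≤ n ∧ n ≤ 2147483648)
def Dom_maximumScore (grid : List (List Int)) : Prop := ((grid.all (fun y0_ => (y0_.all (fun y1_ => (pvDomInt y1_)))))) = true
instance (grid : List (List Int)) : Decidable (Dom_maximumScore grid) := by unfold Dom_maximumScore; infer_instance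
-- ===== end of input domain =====

-- B replaces A's per-column O(n^2) double loops by prefix/suffix running maxima (O(n^3) → O(n^2)); equivalence is about the return value.
-- Values that Python holds as `int or -inf (float)` are modelled as `Option Int` with `none = -inf`.

-- ===== PORT A =====
-- fmax(x, y) = x if x > y else y, at the int/-inf types that actually occur
def fmaxI (x y : Int) : Int := if x > y then x else y
def fmaxIO (x : Int) (y : Option Int) : Int := match y with | none => x | some v => if x > v then x else v
def fmaxOI (x : Option Int) (y : Int) : Option Int := match x with | none => some y | some v => if v > y then some v else some y
def fmaxOO (x y : Option Int) : Option Int :=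
  match x, y with
  | none, b => b
  | some v, none => some v
  | some v, some w => if v > w then some v else some w
-- Python's float arithmetic on `int + (-inf)`: none absorbs
def oadd (x : Option Int) (d : Int) : Option Int := x.map (· + d)
def osub (x : Option Int) (d : Int) : Option Int := x.map (· - d)
-- Python's builtin max(a, b) (returns b only on strict b > a); value-equal to fmax
def pymaxI (x y : Int) : Int := if y > x then y else x
def pymaxIO (x : Int) (y : Option Int) : Int := match y with | none => x | some v => if v > x then v else x
def pymaxOI (x : Option Int) (y : Int) : Option Int := match x with | none => some y | some v => if y > v then some y else some v
def pymaxOO (x y : Option Int) : Option Int :=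
  match x, y with
  | none, b => b
  | some v, none => some v
  | some v, some w => if w > v then some w else some v
-- Python's builtin max(list); the lists here are never empty ([] case is unreachable)
def pymaxListI (l : List Int) : Int := match l with | [] => 0 | x :: xs => xs.foldl pymaxI x
def pymaxListO (l : List (Option Int)) : Option Int := match l with | [] => none | x :: xs => xs.foldl pymaxOO x

-- accs table: for r in range(n): for c in range(n): accs[c+1][r+1] = accs[c+1][r] + grid[r][c]
-- (indices are nonnegative and, under Pre_, in range, so List.getD/List.set are exact for Python's indexing)
def aAccs (grid : List (List Int)) : List (List Int) :=
  let n := grid.length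
  (List.range n).foldl (fun a r =>
      (List.range n).foldl (fun a c =>
        a.set (c+1) ((a.getD (c+1) []).set (r+1) ((a.getD (c+1) []).getD r 0 + (grid.getD r []).getD c 0))) a)
    (List.replicate (n+1) (List.replicate (n+1) (0:Int)))

-- the two nested r/k update loops of one column
def aInner (n : Nat) (a1 a2 : List Int) (dp1 : List Int) (dp2 : List (Option Int)) :
    List Int × List (Option Int) :=
  (List.range (n+1)).foldl (fun p r =>
      ( (List.range' r (n+1-r)).foldl
          (fun l k => l.set k (fmaxI (l.getD k 0) (dp1.getD r 0 + a1.getD k 0 - a1.getD r 0))) p.1,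
        (List.range (r+1)).foldl
          (fun l k => l.set k (fmaxOO (l.getD k none) (oadd (dp2.getD r none) (a2.getD r 0 - a2.getD k 0)))) p.2 ))
    (List.replicate (n+1) (0:Int), List.replicate (n+1) (none : Option Int))

-- one iteration of `for c in range(1, n+1)`
def aCol (n : Nat) (a1 a2 : List Int) (st : List Int × List (Option Int)) :
    List Int × List (Option Int) :=
  let p := aInner n a1 a2 st.1 st.2
  let ndp1 := p.1.set 0 (fmaxIO (p.1.getD 0 0) (st.2.getD 0 none))
  let ndp1 := ndp1.set n (fmaxIO (ndp1.getD n 0) (st.2.getD 0 none))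
  let ndp2 := p.2.set n (fmaxOI (p.2.getD n none) (ndp1.getD n 0))
  (ndp1, ndp2)

def maximumScore (grid : List (List Int)) : Int :=
  let n := grid.length
  let accs := aAccs grid
  let st := (List.range n).foldl (fun st c' => aCol n (accs.getD c' []) (accs.getD (c'+1) []) st)
      (List.replicate (n+1) (0:Int), List.replicate (n+1) (none : Option Int))
  pymaxIO (pymaxListI st.1) (pymaxListO st.2)

-- ===== PORT B =====
-- per-column prefix sums, each column built by one running-sum scan over the rows
def bCols (grid : List (List Int)) : List (List Int) :=
  (List.range grid.length).map (fun c =>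
    (grid.foldl (fun (p : List Int × Int) row =>
        let s := p.2 + row.getD c 0
        (p.1 ++ [s], s)) ([(0:Int)], (0:Int))).1)

-- one column transition: prefix running max for ndp1, suffix running max for ndp2
def bCol (n : Nat) (a1 a2 : List Int) (dp1 : List Int) (dp2 : List (Option Int)) :
    List Int × List (Option Int) :=
  let q1 := (List.range (n+1)).foldl (fun (q : List Int × Option Int) k =>
      let best := pymaxOI q.2 (dp1.getD k 0 - a1.getD k 0)
      (q.1 ++ [pymaxIO 0 (oadd best (a1.getD k 0))], best)) ([], none)
  let q2 := (List.range (n+1)).foldl (fun (q : List (Option Int) × Option Int) i =>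
      let k := n - i
      let best := pymaxOO q.2 (oadd (dp2.getD k none) (a2.getD k 0))
      (q.1 ++ [osub best (a2.getD k 0)], best)) ([], none)
  let ndp1 := q1.1
  let ndp2 := q2.1.reverse
  let ndp1 := ndp1.set 0 (pymaxIO (ndp1.getD 0 0) (dp2.getD 0 none))
  let ndp1 := ndp1.set n (pymaxIO (ndp1.getD n 0) (dp2.getD 0 none))
  let ndp2 := ndp2.set n (pymaxOI (ndp2.getD n none) (ndp1.getD n 0))
  (ndp1, ndp2)

def maximumScore_alt (grid : List (List Int)) : Int :=
  let n := grid.length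
  let st := (bCols grid).foldl
      (fun (st : (List Int × List (Option Int)) × List Int) a2 => (bCol n st.2 a2 st.1.1 st.1.2, a2))
      ((List.replicate (n+1) (0:Int), List.replicate (n+1) (none : Option Int)), List.replicate (n+1) (0:Int))
  pymaxIO (pymaxListI st.1.1) (pymaxListO st.1.2)

-- ===== PRECONDITION & SPEC =====
-- A reads grid[r][c] for all r, c < len(grid): a row shorter than len(grid) raises IndexError (B too); only those inputs are excluded.
def Pre_maximumScore (grid : List (List Int)) : Prop := ∀ row ∈ grid, grid.length ≤ row.length
instance (grid : List (List Int)) : Decidable (Pre_maximumScore grid) := by unfold Pre_maximumScore; infer_instance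
def pvWitness_maximumScore : List (List Int) := [[1, -2], [3, 4]]
def Spec_maximumScore (grid : List (List Int)) (out : Int) : Prop := out = maximumScore_alt grid
instance (grid : List (List Int)) (out : Int) : Decidable (Spec_maximumScore grid out) := by unfold Spec_maximumScore; infer_instance

-- ===== CLAIM (what is proved, stated in full; the proofs are below) =====
def Claim_equal_maximumScore : Prop := ∀ (grid : List (List Int)), Dom_maximumScore grid → Pre_maximumScore grid → Spec_maximumScore grid (maximumScore grid)

-- ===== LEMMAS AND PROOFS =====

-- basic getD/set
theorem pv_getD_set {α : Type} (l : List α) (i j : Nat) (v d : α) :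
    (l.set i v).getD j d = if i = j ∧ i < l.length then v else l.getD j d := by
  simp only [List.getD_eq_getElem?_getD, List.getElem?_set]
  split_ifs with h1 h2 h3 <;> simp_all <;> omega

-- g1: independent-index set fold over range'
theorem pv_foldl_set {α : Type} (d : α) (t : Nat → α → α) :
    ∀ (len a : Nat) (l : List α),
      (((List.range' a len).foldl (fun l k => l.set k (t k (l.getD k d))) l).length = l.length) ∧
      (∀ j, ((List.range' a len).foldl (fun l k => l.set k (t k (l.getD k d))) l).getD j d
        = if a ≤ j ∧ j < a + len ∧ j < l.length then t j (l.getD j d) else l.getD j d) := by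
  intro len
  induction len with
  | zero =>
    intro a l
    refine ⟨by simp, ?_⟩
    intro j; simp; omega
  | succ m ih =>
    intro a l
    rw [List.range'_succ]
    simp only [List.foldl_cons]
    obtain ⟨ihlen, ihget⟩ := ih (a+1) (l.set a (t a (l.getD a d)))
    constructor
    · rw [ihlen, List.length_set]
    · intro j
      rw [ihget j]
      simp only [List.length_set]
      by_cases hj : j = a
      · subst hj
        rw [pv_getD_set]
        split_ifs <;> simp_all <;> omega
      · rw [pv_getD_set]
        split_ifs <;> simp_all <;> omega
-- g2: scan-with-append fold
def scanOut {α β : Type} (f : β → Nat → β) (g : β → Nat → α) (b : β) : List Nat → List α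
  | [] => []
  | k :: ks => g (f b k) k :: scanOut f g (f b k) ks

theorem pv_foldl_scan {α β : Type} (f : β → Nat → β) (g : β → Nat → α) :
    ∀ (ks : List Nat) (acc : List α) (b : β),
      ks.foldl (fun (q : List α × β) k => (q.1 ++ [g (f q.2 k) k], f q.2 k)) (acc, b)
      = (acc ++ scanOut f g b ks, ks.foldl f b) := by
  intro ks
  induction ks with
  | nil => intro acc b; simp [scanOut]
  | cons k ks ih =>
    intro acc b
    simp only [List.foldl_cons, scanOut]
    rw [ih]
    simp

theorem pv_scanOut_length {α β : Type} (f : β → Nat → β) (g : β → Nat → α) :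
    ∀ (ks : List Nat) (b : β), (scanOut f g b ks).length = ks.length := by
  intro ks
  induction ks with
  | nil => intro b; simp [scanOut]
  | cons k ks ih => intro b; simp [scanOut, ih]

theorem pv_scanOut_getD {α β : Type} (f : β → Nat → β) (g : β → Nat → α) (d : α) :
    ∀ (ks : List Nat) (b : β) (j : Nat), j < ks.length →
      (scanOut f g b ks).getD j d = g ((ks.take (j+1)).foldl f b) (ks.getD j 0) := by
  intro ks
  induction ks with
  | nil => intro b j h; simp at h
  | cons k ks ih =>
    intro b j h
    match j with
    | 0 => simp [scanOut]
    | j+1 =>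
      simp only [scanOut, List.getD_cons_succ, List.take_succ_cons, List.foldl_cons]
      exact ih (f b k) j (by simpa using h)

-- value lemmas: python builtin max agrees with fmax
theorem pymaxIO_eq (x : Int) (y : Option Int) : pymaxIO x y = fmaxIO x y := by
  cases y with
  | none => rfl
  | some v => simp only [pymaxIO, fmaxIO]; split_ifs <;> omega

theorem pymaxOI_eq (x : Option Int) (y : Int) : pymaxOI x y = fmaxOI x y := by
  cases x with
  | none => rfl
  | some v => simp only [pymaxOI, fmaxOI]; split_ifs <;> simp <;> omega

theorem pymaxOO_eq (x y : Option Int) : pymaxOO x y = fmaxOO x y := by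
  cases x <;> cases y <;> simp only [pymaxOO, fmaxOO] <;> split_ifs <;> simp <;> omega

theorem pymaxOI_eq_fmaxOO (x : Option Int) (y : Int) : pymaxOI x y = fmaxOO x (some y) := by
  cases x with
  | none => rfl
  | some v => simp only [pymaxOI, fmaxOO]; split_ifs <;> simp <;> omega

-- fmax algebra
theorem fmaxI_assoc (x y z : Int) : fmaxI (fmaxI x y) z = fmaxI x (fmaxI y z) := by
  simp only [fmaxI]; split_ifs <;> omega

theorem fmaxOO_assoc (x y z : Option Int) : fmaxOO (fmaxOO x y) z = fmaxOO x (fmaxOO y z) := by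
  cases x <;> cases y <;> cases z <;> simp only [fmaxOO] <;> split_ifs <;>
    simp only [fmaxOO, Option.some.injEq] <;> split_ifs <;> try rfl
  all_goals omega

theorem fmaxOO_comm (x y : Option Int) : fmaxOO x y = fmaxOO y x := by
  cases x <;> cases y <;> simp only [fmaxOO] <;> split_ifs <;> simp_all <;> omega

theorem pv_foldl_fmaxOO_out : ∀ (l : List (Option Int)) (x y : Option Int),
    l.foldl fmaxOO (fmaxOO x y) = fmaxOO x (l.foldl fmaxOO y) := by
  intro l
  induction l with
  | nil => intro x y; rfl
  | cons z l ih =>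
    intro x y
    simp only [List.foldl_cons]
    rw [fmaxOO_assoc, ih]

theorem pv_foldl_fmaxOO_reverse : ∀ (l : List (Option Int)) (b : Option Int),
    l.reverse.foldl fmaxOO b = l.foldl fmaxOO b := by
  intro l
  induction l with
  | nil => intro b; rfl
  | cons x l ih =>
    intro b
    simp only [List.reverse_cons, List.foldl_append, List.foldl_cons, List.foldl_nil, ih]
    rw [fmaxOO_comm b x, pv_foldl_fmaxOO_out l x b]
    exact fmaxOO_comm _ _
-- lifting int folds through `some`
theorem pv_foldl_fmaxOO_some (h : Nat → Int) : ∀ (l : List Nat) (x : Int),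
    l.foldl (fun b r => fmaxOO b (some (h r))) (some x) = some (l.foldl (fun y r => fmaxI y (h r)) x) := by
  intro l
  induction l with
  | nil => intro x; rfl
  | cons r l ih =>
    intro x
    simp only [List.foldl_cons]
    rw [show fmaxOO (some x) (some (h r)) = some (fmaxI x (h r)) by
          simp only [fmaxOO, fmaxI]; split_ifs <;> rfl, ih]

-- adding a constant commutes with the running max
theorem pv_foldl_fmaxI_add (h h' : Nat → Int) (c : Int) (hh : ∀ r, h' r = h r + c) :
    ∀ (l : List Nat) (x : Int),
      l.foldl (fun y r => fmaxI y (h' r)) (x + c) = (l.foldl (fun y r => fmaxI y (h r)) x) + c := by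
  intro l
  induction l with
  | nil => intro x; rfl
  | cons r l ih =>
    intro x
    simp only [List.foldl_cons, hh r]
    rw [show fmaxI (x + c) (h r + c) = fmaxI x (h r) + c by simp only [fmaxI]; split_ifs <;> omega, ih]

-- subtracting a constant commutes with fmaxOO (none = -inf absorbs)
theorem fmaxOO_osub (x y : Option Int) (c : Int) :
    fmaxOO (osub x c) (osub y c) = osub (fmaxOO x y) c := by
  cases x <;> cases y <;> simp only [fmaxOO, osub, Option.map_none, Option.map_some] <;> try rfl
  split_ifs <;> simp only [Option.map_some, Option.some.injEq] <;> omega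

theorem pv_foldl_fmaxOO_osub (h : Nat → Option Int) (c : Int) :
    ∀ (l : List Nat) (b : Option Int),
      l.foldl (fun q r => fmaxOO q (osub (h r) c)) (osub b c)
        = osub (l.foldl (fun q r => fmaxOO q (h r)) b) c := by
  intro l
  induction l with
  | nil => intro b; rfl
  | cons r l ih =>
    intro b
    simp only [List.foldl_cons]
    rw [fmaxOO_osub, ih]
-- the body of aInner's outer loop
def aBody (n : Nat) (a1 a2 : List Int) (dp1 : List Int) (dp2 : List (Option Int)) :
    (List Int × List (Option Int)) → Nat → (List Int × List (Option Int)) := fun p r =>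
  ( (List.range' r (n+1-r)).foldl
      (fun l k => l.set k (fmaxI (l.getD k 0) (dp1.getD r 0 + a1.getD k 0 - a1.getD r 0))) p.1,
    (List.range (r+1)).foldl
      (fun l k => l.set k (fmaxOO (l.getD k none) (oadd (dp2.getD r none) (a2.getD r 0 - a2.getD k 0)))) p.2 )

theorem aInner_eq (n : Nat) (a1 a2 : List Int) (dp1 : List Int) (dp2 : List (Option Int)) :
    aInner n a1 a2 dp1 dp2 = (List.range (n+1)).foldl (aBody n a1 a2 dp1 dp2)
      (List.replicate (n+1) (0:Int), List.replicate (n+1) (none : Option Int)) := rfl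

theorem aInner_aux (n : Nat) (a1 a2 : List Int) (dp1 : List Int) (dp2 : List (Option Int)) :
    ∀ m, m ≤ n+1 →
      (((List.range m).foldl (aBody n a1 a2 dp1 dp2)
          (List.replicate (n+1) (0:Int), List.replicate (n+1) (none : Option Int))).1.length = n+1) ∧
      (((List.range m).foldl (aBody n a1 a2 dp1 dp2)
          (List.replicate (n+1) (0:Int), List.replicate (n+1) (none : Option Int))).2.length = n+1) ∧
      (∀ k, k ≤ n → ((List.range m).foldl (aBody n a1 a2 dp1 dp2)
          (List.replicate (n+1) (0:Int), List.replicate (n+1) (none : Option Int))).1.getD k 0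
        = (List.range (min m (k+1))).foldl (fun y r => fmaxI y (dp1.getD r 0 + a1.getD k 0 - a1.getD r 0)) 0) ∧
      (∀ k, k ≤ n → ((List.range m).foldl (aBody n a1 a2 dp1 dp2)
          (List.replicate (n+1) (0:Int), List.replicate (n+1) (none : Option Int))).2.getD k none
        = (List.range' k (m - k)).foldl (fun q r => fmaxOO q (oadd (dp2.getD r none) (a2.getD r 0 - a2.getD k 0))) none) := by
  intro m
  induction m with
  | zero =>
    intro _
    refine ⟨by simp, by simp, ?_, ?_⟩
    · intro k hk; simp
    · intro k hk; simp
  | succ m ih =>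
    intro hm
    obtain ⟨ih1, ih2, ih3, ih4⟩ := ih (by omega)
    rw [List.range_succ, List.foldl_append, List.foldl_cons, List.foldl_nil]
    set P := (List.range m).foldl (aBody n a1 a2 dp1 dp2)
      (List.replicate (n+1) (0:Int), List.replicate (n+1) (none : Option Int)) with hP
    show ((aBody n a1 a2 dp1 dp2 P m).1.length = n+1) ∧ _ ∧ _ ∧ _
    have g1 := pv_foldl_set (0:Int)
      (fun k x => fmaxI x (dp1.getD m 0 + a1.getD k 0 - a1.getD m 0)) (n+1-m) m P.1
    have g2 := pv_foldl_set (none : Option Int)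
      (fun k x => fmaxOO x (oadd (dp2.getD m none) (a2.getD m 0 - a2.getD k 0))) (m+1) 0 P.2
    rw [← List.range_eq_range'] at g2
    refine ⟨?_, ?_, ?_, ?_⟩
    · show ((List.range' m (n+1-m)).foldl _ P.1).length = n+1
      rw [g1.1, ih1]
    · show ((List.range (m+1)).foldl _ P.2).length = n+1
      rw [g2.1, ih2]
    · intro k hk
      show ((List.range' m (n+1-m)).foldl _ P.1).getD k 0 = _
      rw [g1.2 k, ih1, ih3 k hk]
      by_cases hmk : m ≤ k
      · rw [if_pos ⟨hmk, by omega, by omega⟩]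
        rw [show min (m+1) (k+1) = m + 1 by omega, show min m (k+1) = m by omega]
        rw [List.range_succ, List.foldl_append, List.foldl_cons, List.foldl_nil]
      · rw [if_neg (by omega)]
        rw [show min (m+1) (k+1) = min m (k+1) by omega]
    · intro k hk
      show ((List.range (m+1)).foldl _ P.2).getD k none = _
      rw [g2.2 k, ih2, ih4 k hk]
      by_cases hkm : k ≤ m
      · rw [if_pos ⟨by omega, by omega, by omega⟩]
        rw [show m + 1 - k = (m - k) + 1 by omega, List.range'_concat,
          List.foldl_append, List.foldl_cons, List.foldl_nil,
          show k + 1 * (m - k) = m by omega]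
      · rw [if_neg (by omega)]
        rw [show m + 1 - k = 0 by omega, show m - k = 0 by omega]
theorem pv_foldl_fmaxI_out' (h : Nat → Int) : ∀ (l : List Nat) (x y : Int),
    l.foldl (fun y r => fmaxI y (h r)) (fmaxI x y) = fmaxI x (l.foldl (fun y r => fmaxI y (h r)) y) := by
  intro l
  induction l with
  | nil => intro x y; rfl
  | cons r l ih =>
    intro x y
    simp only [List.foldl_cons]
    rw [fmaxI_assoc, ih]

theorem pv_E1 (u v : Nat → Int) (c : Int) (k : Nat) :
    pymaxIO 0 (oadd ((List.range (k+1)).foldl (fun b r => pymaxOI b (u r - v r)) none) c)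
      = (List.range (k+1)).foldl (fun y r => fmaxI y (u r + c - v r)) 0 := by
  have hf : (fun (b : Option Int) (r : Nat) => pymaxOI b (u r - v r))
      = (fun b r => fmaxOO b (some (u r - v r))) := by
    funext b r; exact pymaxOI_eq_fmaxOO b (u r - v r)
  rw [List.range_succ_eq_map, hf]
  simp only [List.foldl_cons]
  rw [show fmaxOO none (some (u 0 - v 0)) = some (u 0 - v 0) from rfl]
  rw [pv_foldl_fmaxOO_some (fun r => u r - v r) ((List.range k).map Nat.succ) (u 0 - v 0)]
  rw [show oadd (some ((List.map Nat.succ (List.range k)).foldl (fun y r => fmaxI y (u r - v r)) (u 0 - v 0))) c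
      = some (((List.map Nat.succ (List.range k)).foldl (fun y r => fmaxI y (u r - v r)) (u 0 - v 0)) + c) from rfl]
  rw [pymaxIO_eq]
  rw [show ∀ x w : Int, fmaxIO x (some w) = fmaxI x w from fun _ _ => rfl]
  rw [pv_foldl_fmaxI_out' (fun r => u r + c - v r) (List.map Nat.succ (List.range k)) 0 (u 0 + c - v 0)]
  rw [← pv_foldl_fmaxI_add (fun r => u r - v r) (fun r => u r + c - v r) c (by intro r; ring)
      ((List.map Nat.succ (List.range k))) (u 0 - v 0)]
  rw [show u 0 - v 0 + c = u 0 + c - v 0 by ring]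


theorem pv_rev_map (n j : Nat) (hj : j ≤ n) :
    (List.range (j+1)).map (fun i => n - i) = (List.range' (n-j) (j+1)).reverse := by
  apply List.ext_getElem
  · simp
  · intro i h1 h2
    simp only [List.getElem_map, List.getElem_range, List.getElem_reverse, List.length_range',
      List.getElem_range']
    simp only [List.length_map, List.length_range] at h1
    omega

theorem pv_E2 (w : Nat → Option Int) (v : Nat → Int) (n k : Nat) (hk : k ≤ n) :
    osub ((List.range (n-k+1)).foldl (fun b i => pymaxOO b (oadd (w (n-i)) (v (n-i)))) none) (v k)
      = (List.range' k (n+1-k)).foldl (fun q r => fmaxOO q (oadd (w r) (v r - v k))) none := by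
  have hf : (fun (b : Option Int) (i : Nat) => pymaxOO b (oadd (w (n-i)) (v (n-i))))
      = (fun b i => fmaxOO b (oadd (w (n-i)) (v (n-i)))) := by
    funext b i; exact pymaxOO_eq _ _
  rw [hf]
  have h1 : (List.range (n-k+1)).foldl (fun b i => fmaxOO b (oadd (w (n-i)) (v (n-i)))) none
      = ((List.range (n-k+1)).map (fun i => n - i)).foldl (fun b r => fmaxOO b (oadd (w r) (v r))) none := by
    rw [List.foldl_map]
  rw [h1, pv_rev_map n (n-k) (by omega), show n - (n - k) = k by omega,
    show (n : Nat) - k + 1 = n + 1 - k by omega]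
  have h2 : ∀ (l : List Nat) (b : Option Int), l.foldl (fun b r => fmaxOO b (oadd (w r) (v r))) b
      = (l.map (fun r => oadd (w r) (v r))).foldl fmaxOO b := by
    intro l b; rw [List.foldl_map]
  rw [h2, List.map_reverse, pv_foldl_fmaxOO_reverse, ← h2]
  have h3 : (fun (q : Option Int) (r : Nat) => fmaxOO q (oadd (w r) (v r - v k)))
      = (fun q r => fmaxOO q (osub (oadd (w r) (v r)) (v k))) := by
    funext q r
    cases w r with
    | none => rfl
    | some x => simp only [oadd, osub, Option.map_some]; congr 1; ring
  rw [h3]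
  rw [show (none : Option Int) = osub none (v k) from rfl]
  exact (pv_foldl_fmaxOO_osub (fun r => oadd (w r) (v r)) (v k) (List.range' k (n+1-k)) none).symm
theorem pv_list_eq {α : Type} (d : α) (l1 l2 : List α) (hl : l1.length = l2.length)
    (h : ∀ i, i < l1.length → l1.getD i d = l2.getD i d) : l1 = l2 := by
  apply List.ext_getElem hl
  intro i h1 h2
  have hh := h i h1
  rwa [List.getD_eq_getElem l1 d h1, List.getD_eq_getElem l2 d h2] at hh

theorem bCol_eq_aCol (n : Nat) (a1 a2 dp1 : List Int) (dp2 : List (Option Int)) :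
    bCol n a1 a2 dp1 dp2 = aCol n a1 a2 (dp1, dp2) := by
  obtain ⟨hl1, hl2, hg1, hg2⟩ := aInner_aux n a1 a2 dp1 dp2 (n+1) (le_refl _)
  rw [← aInner_eq] at hl1 hl2 hg1 hg2
  have hq1 := pv_foldl_scan (fun (b : Option Int) k => pymaxOI b (dp1.getD k 0 - a1.getD k 0))
      (fun b k => pymaxIO 0 (oadd b (a1.getD k 0))) (List.range (n+1)) [] none
  have hq2 := pv_foldl_scan (fun (b : Option Int) i => pymaxOO b (oadd (dp2.getD (n-i) none) (a2.getD (n-i) 0)))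
      (fun b i => osub b (a2.getD (n-i) 0)) (List.range (n+1)) [] none
  have e1 : scanOut (fun (b : Option Int) k => pymaxOI b (dp1.getD k 0 - a1.getD k 0))
      (fun b k => pymaxIO 0 (oadd b (a1.getD k 0))) none (List.range (n+1))
      = (aInner n a1 a2 dp1 dp2).1 := by
    apply pv_list_eq 0
    · rw [pv_scanOut_length, List.length_range, hl1]
    · intro i hi
      rw [pv_scanOut_length, List.length_range] at hi
      rw [pv_scanOut_getD _ _ _ _ _ i (by simp; try omega)]
      rw [List.take_range, show min (i+1) (n+1) = i + 1 by omega]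
      have hri : (List.range (n+1)).getD i 0 = i := by
        rw [List.getD_eq_getElem _ _ (by simp; try omega)]; simp
      rw [hri]
      rw [hg1 i (by omega), show min (n+1) (i+1) = i + 1 by omega]
      exact pv_E1 (fun r => dp1.getD r 0) (fun r => a1.getD r 0) (a1.getD i 0) i
  have e2 : (scanOut (fun (b : Option Int) i => pymaxOO b (oadd (dp2.getD (n-i) none) (a2.getD (n-i) 0)))
      (fun b i => osub b (a2.getD (n-i) 0)) none (List.range (n+1))).reverse
      = (aInner n a1 a2 dp1 dp2).2 := by
    apply pv_list_eq none
    · rw [List.length_reverse, pv_scanOut_length, List.length_range, hl2]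
    · intro k hk
      rw [List.length_reverse, pv_scanOut_length, List.length_range] at hk
      have hrev : (scanOut (fun (b : Option Int) i => pymaxOO b (oadd (dp2.getD (n-i) none) (a2.getD (n-i) 0)))
          (fun b i => osub b (a2.getD (n-i) 0)) none (List.range (n+1))).reverse.getD k none
          = (scanOut (fun (b : Option Int) i => pymaxOO b (oadd (dp2.getD (n-i) none) (a2.getD (n-i) 0)))
          (fun b i => osub b (a2.getD (n-i) 0)) none (List.range (n+1))).getD (n - k) none := by
        rw [List.getD_eq_getElem _ _ (by simp [pv_scanOut_length]; try omega),
            List.getD_eq_getElem _ _ (by simp [pv_scanOut_length]; try omega),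
            List.getElem_reverse]
        congr 1
        simp [pv_scanOut_length]
        try omega
      rw [hrev]
      rw [pv_scanOut_getD _ _ _ _ _ (n-k) (by simp; try omega)]
      rw [List.take_range, show min (n-k+1) (n+1) = n - k + 1 by omega]
      have hrk : (List.range (n+1)).getD (n-k) 0 = n - k := by
        rw [List.getD_eq_getElem _ _ (by simp; try omega)]; simp
      rw [hrk, show n - (n - k) = k by omega]
      rw [hg2 k (by omega), show n + 1 - k = n + 1 - k from rfl]
      exact pv_E2 (fun r => dp2.getD r none) (fun r => a2.getD r 0) n k (by omega)
  unfold bCol aCol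
  rw [hq1, hq2]
  simp only [List.nil_append]
  rw [e1, e2]
  simp only [pymaxIO_eq, pymaxOI_eq]
def psum (grid : List (List Int)) (c r : Nat) : Int :=
  ((grid.take r).map (fun row => row.getD c 0)).sum

def pcol (grid : List (List Int)) (c : Nat) : List Int :=
  (List.range (grid.length+1)).map (psum grid c)

theorem psum_zero (grid : List (List Int)) (c : Nat) : psum grid c 0 = 0 := by simp [psum]

theorem psum_cons (row : List Int) (rest : List (List Int)) (c i : Nat) :
    psum (row :: rest) c (i+1) = row.getD c 0 + psum rest c i := by simp [psum]

theorem psum_succ (grid : List (List Int)) (c m : Nat) (h : m < grid.length) :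
    psum grid c (m+1) = psum grid c m + (grid.getD m []).getD c 0 := by
  unfold psum
  rw [List.take_succ, List.map_append, List.sum_append]
  rw [List.getElem?_eq_getElem h]
  rw [List.getD_eq_getElem _ _ h]
  simp

theorem pv_getD_map_range {α : Type} (d : α) (f : Nat → α) (len i : Nat) (h : i < len) :
    ((List.range len).map f).getD i d = f i := by
  rw [List.getD_eq_getElem _ _ (by simp [h])]; simp

theorem pv_set_map_range {α : Type} (f : Nat → α) (len i : Nat) (v : α) :
    ((List.range len).map f).set i v = (List.range len).map (fun j => if j = i then v else f j) := by
  apply List.ext_getElem (by simp)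
  intro j h1 h2
  by_cases hj : j = i
  · subst hj; simp [List.getElem_set]
  · simp [List.getElem_set, hj, Ne.symm hj]

theorem pv_getD_replicate {α : Type} (d x : α) (len i : Nat) (h : i < len) :
    (List.replicate len x).getD i d = x := by
  rw [List.getD_eq_getElem _ _ (by simp [h])]; simp

-- the accs table: column 0 stays all-zero, column c+1 holds prefix sums of grid column c
theorem aAccs_aux (grid : List (List Int)) :
    ∀ m, m ≤ grid.length →
      (((List.range m).foldl (fun a r =>
          (List.range grid.length).foldl (fun a c =>
            a.set (c+1) ((a.getD (c+1) []).set (r+1) ((a.getD (c+1) []).getD r 0 + (grid.getD r []).getD c 0))) a)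
          (List.replicate (grid.length+1) (List.replicate (grid.length+1) (0:Int)))).length = grid.length+1) ∧
      (((List.range m).foldl (fun a r =>
          (List.range grid.length).foldl (fun a c =>
            a.set (c+1) ((a.getD (c+1) []).set (r+1) ((a.getD (c+1) []).getD r 0 + (grid.getD r []).getD c 0))) a)
          (List.replicate (grid.length+1) (List.replicate (grid.length+1) (0:Int)))).getD 0 []
        = List.replicate (grid.length+1) (0:Int)) ∧
      (∀ c, c < grid.length →
        ((List.range m).foldl (fun a r =>
          (List.range grid.length).foldl (fun a c =>
            a.set (c+1) ((a.getD (c+1) []).set (r+1) ((a.getD (c+1) []).getD r 0 + (grid.getD r []).getD c 0))) a)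
          (List.replicate (grid.length+1) (List.replicate (grid.length+1) (0:Int)))).getD (c+1) []
        = (List.range (grid.length+1)).map (fun i => if i ≤ m then psum grid c i else 0)) := by
  intro m
  induction m with
  | zero =>
    intro _
    refine ⟨by simp, ?_, ?_⟩
    · simp only [List.range_zero, List.foldl_nil]
      rw [pv_getD_replicate _ _ _ 0 (by omega)]
    · intro c hc
      simp only [List.range_zero, List.foldl_nil]
      rw [pv_getD_replicate _ _ _ (c+1) (by omega)]
      apply pv_list_eq (0:Int) _ _ (by simp)
      intro i hi
      simp only [List.length_replicate] at hi
      rw [pv_getD_replicate _ _ _ i hi, pv_getD_map_range _ _ _ i hi]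
      split_ifs with h
      · have : i = 0 := by omega
        subst this
        exact (psum_zero grid c).symm
      · rfl
  | succ m ih =>
    intro hm
    obtain ⟨ihlen, ih0, ihc⟩ := ih (by omega)
    rw [List.range_succ, List.foldl_append, List.foldl_cons, List.foldl_nil]
    set P := (List.range m).foldl (fun a r =>
          (List.range grid.length).foldl (fun a c =>
            a.set (c+1) ((a.getD (c+1) []).set (r+1) ((a.getD (c+1) []).getD r 0 + (grid.getD r []).getD c 0))) a)
          (List.replicate (grid.length+1) (List.replicate (grid.length+1) (0:Int))) with hP
    -- rewrite the inner fold over c as a fold over range' 1 n of uniform set-update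
    have hconv : (List.range grid.length).foldl (fun a c =>
        a.set (c+1) ((a.getD (c+1) []).set (m+1) ((a.getD (c+1) []).getD m 0 + (grid.getD m []).getD c 0))) P
        = (List.range' 1 grid.length).foldl (fun a k =>
            a.set k ((fun k col => col.set (m+1) (col.getD m 0 + (grid.getD m []).getD (k-1) 0)) k (a.getD k []))) P := by
      rw [List.range'_eq_map_range, List.foldl_map]
      congr 1
      funext a c
      simp only
      rw [show 1 + c = c + 1 by omega]
      simp
    rw [hconv]
    have g := pv_foldl_set ([] : List Int)
      (fun k col => col.set (m+1) (col.getD m 0 + (grid.getD m []).getD (k-1) 0)) grid.length 1 P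
    refine ⟨?_, ?_, ?_⟩
    · rw [g.1, ihlen]
    · rw [g.2 0, if_neg (by omega), ih0]
    · intro c hc
      rw [g.2 (c+1), if_pos ⟨by omega, by omega, by rw [ihlen]; omega⟩, ihc c hc]
      simp only [show c + 1 - 1 = c from rfl]
      rw [pv_getD_map_range _ _ _ m (by omega), if_pos (le_refl m)]
      rw [pv_set_map_range]
      apply List.map_congr_left
      intro i hi
      simp only [List.mem_range] at hi
      by_cases h1 : i = m+1
      · subst h1
        rw [if_pos rfl, if_pos (by omega)]
        exact (psum_succ grid c m (by omega)).symm
      · rw [if_neg h1]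
        split_ifs with h2 h3
        · rfl
        · omega
        · omega
        · rfl
theorem aAccs_getD0 (grid : List (List Int)) :
    (aAccs grid).getD 0 [] = List.replicate (grid.length+1) (0:Int) :=
  (aAccs_aux grid grid.length (le_refl _)).2.1

theorem aAccs_getD_succ (grid : List (List Int)) (c : Nat) (hc : c < grid.length) :
    (aAccs grid).getD (c+1) [] = pcol grid c := by
  have h := (aAccs_aux grid grid.length (le_refl _)).2.2 c hc
  rw [show (aAccs grid) = (List.range grid.length).foldl (fun a r =>
      (List.range grid.length).foldl (fun a c =>
        a.set (c+1) ((a.getD (c+1) []).set (r+1) ((a.getD (c+1) []).getD r 0 + (grid.getD r []).getD c 0))) a)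
      (List.replicate (grid.length+1) (List.replicate (grid.length+1) (0:Int))) from rfl, h]
  unfold pcol
  apply List.map_congr_left
  intro i hi
  simp only [List.mem_range] at hi
  rw [if_pos (by omega)]

theorem pv_bscan (c : Nat) : ∀ (rows : List (List Int)) (acc : List Int) (s : Int),
    rows.foldl (fun (p : List Int × Int) row =>
        (p.1 ++ [p.2 + row.getD c 0], p.2 + row.getD c 0)) (acc, s)
      = (acc ++ (List.range rows.length).map (fun i => s + psum rows c (i+1)),
         s + psum rows c rows.length) := by
  intro rows
  induction rows with
  | nil => intro acc s; simp [psum]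
  | cons row rest ih =>
    intro acc s
    simp only [List.foldl_cons]
    rw [ih (acc ++ [s + row.getD c 0]) (s + row.getD c 0)]
    simp only [List.length_cons]
    apply Prod.ext
    · simp only
      rw [List.append_assoc, List.singleton_append]
      congr 1
      rw [List.range_succ_eq_map, List.map_cons, List.map_map]
      congr 1
      · rw [psum_cons, psum_zero]; ring
      · apply List.map_congr_left
        intro i _
        simp only [Function.comp_apply]
        rw [psum_cons]
        ring
    · simp only
      rw [psum_cons]
      ring

theorem bCols_eq (grid : List (List Int)) :
    bCols grid = (List.range grid.length).map (pcol grid) := by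
  unfold bCols
  apply List.map_congr_left
  intro c _
  have hb : (grid.foldl (fun (p : List Int × Int) row =>
      let s := p.2 + row.getD c 0
      (p.1 ++ [s], s)) ([(0:Int)], (0:Int)))
      = ([(0:Int)] ++ (List.range grid.length).map (fun i => 0 + psum grid c (i+1)),
         0 + psum grid c grid.length) := pv_bscan c grid [0] 0
  rw [hb]
  show ([(0:Int)] ++ (List.range grid.length).map (fun i => 0 + psum grid c (i+1))) = pcol grid c
  unfold pcol
  rw [List.range_succ_eq_map, List.map_cons, List.map_map, List.singleton_append]
  congr 1
  apply List.map_congr_left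
  intro i _
  simp only [Function.comp_apply, Nat.succ_eq_add_one]
  omega

theorem main_aux (grid : List (List Int)) :
    ∀ m, m ≤ grid.length →
      (((List.range m).foldl (fun st c =>
          (bCol grid.length st.2 (pcol grid c) st.1.1 st.1.2, pcol grid c))
          ((List.replicate (grid.length+1) (0:Int), List.replicate (grid.length+1) (none : Option Int)),
           List.replicate (grid.length+1) (0:Int))).1
        = (List.range m).foldl (fun st c' =>
            aCol grid.length ((aAccs grid).getD c' []) ((aAccs grid).getD (c'+1) []) st)
          (List.replicate (grid.length+1) (0:Int), List.replicate (grid.length+1) (none : Option Int))) ∧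
      (((List.range m).foldl (fun st c =>
          (bCol grid.length st.2 (pcol grid c) st.1.1 st.1.2, pcol grid c))
          ((List.replicate (grid.length+1) (0:Int), List.replicate (grid.length+1) (none : Option Int)),
           List.replicate (grid.length+1) (0:Int))).2
        = (aAccs grid).getD m []) := by
  intro m
  induction m with
  | zero =>
    intro _
    refine ⟨by simp, ?_⟩
    simp only [List.range_zero, List.foldl_nil]
    rw [aAccs_getD0]
  | succ m ih =>
    intro hm
    obtain ⟨ihA, ihP⟩ := ih (by omega)
    rw [List.range_succ]
    rw [List.foldl_append, List.foldl_append, List.foldl_cons, List.foldl_cons,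
        List.foldl_nil, List.foldl_nil]
    refine ⟨?_, ?_⟩
    · simp only
      rw [ihA, ihP, aAccs_getD_succ grid m (by omega)]
      rw [bCol_eq_aCol]
    · simp only
      rw [aAccs_getD_succ grid m (by omega)]

theorem maximumScore_eq_alt (grid : List (List Int)) :
    maximumScore grid = maximumScore_alt grid := by
  simp only [maximumScore, maximumScore_alt]
  rw [bCols_eq, List.foldl_map]
  obtain ⟨hA, _⟩ := main_aux grid grid.length (le_refl _)
  rw [hA]

-- ===== VERDICT (by name: the statement is the Claim_ definition above) =====
theorem maximumScore_spec : Claim_equal_maximumScore := by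
  intro grid _ _
  exact maximumScore_eq_alt grid
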